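-- pv_equiv track=rewrite | github.com/hmin0503/SWCodingTest | Archive/Programmers/pr_autocomplete.py | solution
-- ===== SOURCE A (Python) =====
-- def solution(words):
--     answer = 0
--     eng_dict = {}
--     for word in words:
--         for i in range(len(word)):
--             if word[:(i+1)] in eng_dict.keys():
--                 eng_dict[word[:(i+1)]] += 1
--             else:
--                 eng_dict[word[:(i+1)]] = 1
--
--     for word in words:
--         for i in range(len(word)):
--             if eng_dict[word[:(i+1)]] != 1:
--                 answer += 1
--             else :
--                 answer += 1
--                 break
--     return answer
-- ===== SOURCE B (Python) =====
-- def solution(words):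
--     # Trie of prefix frequencies: one pass to build (O(total chars)),
--     # one pass to count typed characters, no per-prefix string slicing.
--     root = {}
--     for w in words:
--         node = root
--         for c in w:
--             entry = node.get(c)
--             if entry is None:
--                 entry = [0, {}]
--                 node[c] = entry
--             entry[0] += 1
--             node = entry[1]
--     total = 0
--     for w in words:
--         node = root
--         for c in w:
--             entry = node[c]
--             total += 1
--             if entry[0] == 1:
--                 break
--             node = entry[1]
--     return total
-- ===== Notes on version B (the rewrite author's own statement) =====
-- stated objective: faster
-- what changed: Replaces A's dict keyed by per-prefix string slices (two passes of nested loops building word[:i+1] slices) with a character trie storing prefix frequencies, built and queried one character at a time with no slicing or hashing of prefixes.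
import Mathlib
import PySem

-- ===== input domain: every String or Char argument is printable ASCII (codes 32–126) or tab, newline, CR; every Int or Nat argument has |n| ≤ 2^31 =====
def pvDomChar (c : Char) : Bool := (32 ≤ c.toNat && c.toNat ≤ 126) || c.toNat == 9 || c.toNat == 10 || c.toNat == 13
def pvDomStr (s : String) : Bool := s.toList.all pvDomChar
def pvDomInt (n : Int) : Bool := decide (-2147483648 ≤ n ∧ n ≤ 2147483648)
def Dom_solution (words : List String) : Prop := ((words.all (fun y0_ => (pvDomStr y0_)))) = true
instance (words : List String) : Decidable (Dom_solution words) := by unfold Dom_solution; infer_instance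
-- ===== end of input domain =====

-- B replaces A's dict of per-prefix string slices by a character trie of prefix frequencies
-- built in one pass over the characters (objective: faster; no per-prefix slicing/hashing).

-- ===== PORT A =====
-- one dict-update step: `if key in eng_dict.keys(): eng_dict[key] += 1 else: eng_dict[key] = 1`
def dictStep (d : PySem.Dict String Int) (k : String) : PySem.Dict String Int :=
  match d.get? k with
  | some v => d.insert k (v + 1)
  | none => d.insert k 1

-- first-pass inner loop: `for i in range(len(word)): …` over the slices word[:(i+1)]
def insertWordA (d : PySem.Dict String Int) (w : String) : PySem.Dict String Int :=
  (PySem.List.pyRange 0 (PySem.Str.len w) 1).foldl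
    (fun d i => dictStep d (PySem.Str.slice w none (some (i + 1)))) d

-- second-pass inner loop with its `break`; `eng_dict[word[:(i+1)]]` never misses
-- (every queried key was inserted in the first pass), so getD 0 is exact here
def loopA (d : PySem.Dict String Int) (w : String) : List Int → Int
  | [] => 0
  | i :: rest =>
    if d.getD (PySem.Str.slice w none (some (i + 1))) 0 ≠ 1 then 1 + loopA d w rest else 1

def solution (words : List String) : Int :=
  let d := words.foldl insertWordA PySem.Dict.empty
  words.foldl (fun answer w => answer + loopA d w (PySem.List.pyRange 0 (PySem.Str.len w) 1)) 0

-- ===== PORT B =====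
-- a trie node holds its count (`entry[0]`) and its children (`entry[1]`);
-- children as an explicit association-list type (mutual pair, no nested inductive)
mutual
inductive PTrie where
  | node : Int → PTrieL → PTrie
  deriving DecidableEq, Repr
inductive PTrieL where
  | nil : PTrieL
  | cons : Char → PTrie → PTrieL → PTrieL
  deriving DecidableEq, Repr
end

-- `node.get(c)`
def PTrieL.find? : PTrieL → Char → Option PTrie
  | .nil, _ => none
  | .cons c t rest, x => if c = x then some t else PTrieL.find? rest x

-- `node[c] = entry` (overwrite in place, new keys appended — dict semantics)
def PTrieL.set : PTrieL → Char → PTrie → PTrieL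
  | .nil, x, t => .cons x t .nil
  | .cons c t rest, x, t' => if c = x then .cons c t' rest else .cons c t (PTrieL.set rest x t')

-- build-pass inner loop: fetch-or-create the child entry, bump its count, descend
def insertChars : List Char → PTrieL → PTrieL
  | [], l => l
  | c :: cs, l =>
    match l.find? c with
    | some (.node n ch) => l.set c (.node (n + 1) (insertChars cs ch))
    | none => l.set c (.node 1 (insertChars cs .nil))

-- query-pass inner loop with its `break`; `node[c]` never misses for an inserted word
-- (the none branch is unreachable there; the Python would raise KeyError)
def queryChars : List Char → PTrieL → Int
  | [], _ => 0
  | c :: cs, l =>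
    match l.find? c with
    | none => 0
    | some (.node n ch) => if n = 1 then 1 else 1 + queryChars cs ch

def solution_alt (words : List String) : Int :=
  let root := words.foldl (fun l w => insertChars w.toList l) .nil
  words.foldl (fun total w => total + queryChars w.toList root) 0

-- ===== PRECONDITION & SPEC =====
def Spec_solution (words : List String) (out : Int) : Prop := out = solution_alt words
instance (words : List String) (out : Int) : Decidable (Spec_solution words out) := by unfold Spec_solution; infer_instance

-- ===== CLAIM (what is proved, stated in full; the proofs are below) =====
def Claim_equal_solution : Prop := ∀ (words : List String), Dom_solution words → Spec_solution words (solution words)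

-- ===== LEMMAS AND PROOFS =====

-- number of words having p as a prefix: the common meaning of both prefix-frequency stores
def pcount (words : List String) (p : List Char) : Int :=
  (words.countP (fun w => p.isPrefixOf w.toList) : Int)

-- the count stored in the trie at path p (0 if the path is absent; p = [] unused)
def cnt : PTrieL → List Char → Int
  | _, [] => 0
  | l, c :: cs =>
    match l.find? c with
    | none => 0
    | some (.node n ch) => if cs = [] then n else cnt ch cs

-- the abstract typed-characters count along a word, reading prefix frequencies from f
def typed (f : List Char → Int) : List Char → List Char → Int
  | _, [] => 0
  | pre, c :: cs => if f (pre ++ [c]) ≠ 1 then 1 + typed f (pre ++ [c]) cs else 1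

theorem key_toList (w : String) (k : Nat) :
    (PySem.Str.slice w none (some ((k : Int) + 1))).toList = w.toList.take (k + 1) := by
  rw [PySem.Str.slice, PySem.Chars.slice, PySem.List.slice_to _ (by omega)]
  have : ((k : Int) + 1).toNat = k + 1 := by omega
  rw [this]; simp

theorem getD_dictStep (d : PySem.Dict String Int) (k p : String) :
    (dictStep d k).getD p 0 = d.getD p 0 + (if p = k then 1 else 0) := by
  unfold dictStep
  cases h : d.get? k with
  | some v =>
    rw [PySem.Dict.getD_insert]
    by_cases hpk : p = k
    · subst hpk
      rw [PySem.Dict.getD_eq_get?_getD, h]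
      simp
    · simp [hpk]
  | none =>
    rw [PySem.Dict.getD_insert]
    by_cases hpk : p = k
    · subst hpk
      rw [PySem.Dict.getD_eq_get?_getD, h]
      simp
    · simp [hpk]

theorem auxA (w p : String) (hp : p.toList ≠ []) :
    ∀ (n : Nat), n ≤ w.toList.length → ∀ d : PySem.Dict String Int,
    ((List.range n).foldl
        (fun (d : PySem.Dict String Int) (k : Nat) =>
          dictStep d (PySem.Str.slice w none (some ((k : Int) + 1)))) d).getD p 0
      = d.getD p 0
        + (if p.toList.isPrefixOf w.toList ∧ p.toList.length ≤ n then 1 else 0) := by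
  intro n
  induction n with
  | zero =>
    intro _ d
    have hcond : ¬ (p.toList.isPrefixOf w.toList = true ∧ p.toList.length ≤ 0) := by
      rintro ⟨_, h0⟩
      exact hp (List.eq_nil_of_length_eq_zero (Nat.le_zero.mp h0))
    rw [List.range_zero]
    simp only [List.foldl_nil, if_neg hcond, add_zero]
  | succ n ih =>
    intro hn d
    rw [List.range_succ, List.foldl_append]
    simp only [List.foldl_cons, List.foldl_nil]
    rw [getD_dictStep, ih (by omega) d]
    have hkey : (p = PySem.Str.slice w none (some ((n : Int) + 1)))
        ↔ p.toList = w.toList.take (n + 1) := by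
      rw [← String.toList_inj, key_toList]
    have hlen : (w.toList.take (n + 1)).length = n + 1 := by
      rw [List.length_take]; omega
    by_cases hpre : p.toList.isPrefixOf w.toList
    · have hpre' : p.toList <+: w.toList := by rwa [← List.isPrefixOf_iff_prefix]
      by_cases hle : p.toList.length ≤ n
      · have hkn : ¬ p = PySem.Str.slice w none (some ((n : Int) + 1)) := by
          rw [hkey]
          intro h
          rw [h, hlen] at hle
          omega
        rw [if_pos (And.intro hpre hle), if_pos (And.intro hpre (by omega : p.toList.length ≤ n + 1)), if_neg hkn]
        ring
      · by_cases hle1 : p.toList.length ≤ n + 1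
        · have hplen : p.toList.length = n + 1 := by omega
          have hk : p = PySem.Str.slice w none (some ((n : Int) + 1)) := by
            rw [hkey]
            have := List.prefix_iff_eq_take.mp hpre'
            rw [this, hplen]
          rw [if_neg (fun (hA : p.toList.isPrefixOf w.toList = true ∧ p.toList.length ≤ n) => hle hA.2), if_pos (And.intro hpre hle1), if_pos hk]
          ring
        · have hkn : ¬ p = PySem.Str.slice w none (some ((n : Int) + 1)) := by
            rw [hkey]
            intro h
            rw [h, hlen] at hle1
            omega
          rw [if_neg (fun (hA : p.toList.isPrefixOf w.toList = true ∧ p.toList.length ≤ n) => hle hA.2), if_neg (fun (hA : p.toList.isPrefixOf w.toList = true ∧ p.toList.length ≤ n + 1) => hle1 hA.2), if_neg hkn]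
          ring
    · have hkn : ¬ p = PySem.Str.slice w none (some ((n : Int) + 1)) := by
        rw [hkey]
        intro h
        apply hpre
        rw [List.isPrefixOf_iff_prefix, h]
        exact List.take_prefix _ _
      rw [if_neg (fun (hA : p.toList.isPrefixOf w.toList = true ∧ p.toList.length ≤ n) => hpre hA.1), if_neg (fun (hA : p.toList.isPrefixOf w.toList = true ∧ p.toList.length ≤ n + 1) => hpre hA.1), if_neg hkn]
      ring

theorem getD_insertWordA (d : PySem.Dict String Int) (w p : String) (hp : p.toList ≠ []) :
    (insertWordA d w).getD p 0
      = d.getD p 0 + (if p.toList.isPrefixOf w.toList then 1 else 0) := by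
  unfold insertWordA
  rw [PySem.Str.len, PySem.List.pyRange_one, List.foldl_map]
  have h0 : ((w.toList.length : Int) - 0).toNat = w.toList.length := by omega
  rw [h0]
  have := auxA w p hp w.toList.length le_rfl d
  simp only [zero_add] at this ⊢
  rw [this]
  by_cases hpre : p.toList.isPrefixOf w.toList
  · have hlen : p.toList.length ≤ w.toList.length :=
      List.IsPrefix.length_le (List.isPrefixOf_iff_prefix.mp hpre)
    rw [if_pos (And.intro hpre hlen), if_pos hpre]
  · rw [if_neg (fun (hA : p.toList.isPrefixOf w.toList = true ∧ p.toList.length ≤ w.toList.length) => hpre hA.1), if_neg hpre]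

theorem getD_buildA (words : List String) (d : PySem.Dict String Int) (p : String)
    (hp : p.toList ≠ []) :
    (words.foldl insertWordA d).getD p 0 = d.getD p 0 + pcount words p.toList := by
  induction words generalizing d with
  | nil => simp [pcount]
  | cons w ws ih =>
    simp only [List.foldl_cons]
    rw [ih, getD_insertWordA d w p hp]
    unfold pcount
    rw [List.countP_cons]
    by_cases h : p.toList.isPrefixOf w.toList <;> simp [h] <;> push_cast <;> ring

theorem cnt_cons (l : PTrieL) (c : Char) (cs : List Char) :
    cnt l (c :: cs)
      = (match l.find? c with
         | none => 0
         | some (.node n ch) => if cs = [] then n else cnt ch cs) := rfl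

theorem find?_set : ∀ (l : PTrieL) (c x : Char) (t : PTrie),
    (l.set c t).find? x = if x = c then some t else l.find? x
  | .nil, c, x, t => by
    simp only [PTrieL.set, PTrieL.find?]
    by_cases h : c = x
    · rw [if_pos h, if_pos h.symm]
    · rw [if_neg h, if_neg (fun hh => h hh.symm)]
  | .cons c' t' rest, c, x, t => by
    have ih := find?_set rest c x t
    by_cases h1 : c' = c
    · subst h1
      simp only [PTrieL.set]
      rw [if_pos trivial]
      simp only [PTrieL.find?]
      by_cases h2 : c' = x
      · rw [if_pos h2, if_pos h2.symm]
      · rw [if_neg h2, if_neg (fun (hh : x = c') => h2 hh.symm), if_neg h2]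
    · simp only [PTrieL.set]
      rw [if_neg h1]
      simp only [PTrieL.find?]
      rw [ih]
      by_cases h2 : c' = x
      · have hxc : ¬ x = c := fun hh => h1 (h2.trans hh)
        rw [if_pos h2, if_neg hxc, if_pos h2]
      · rw [if_neg h2, if_neg h2]

theorem cnt_insertChars (w : List Char) (l : PTrieL) (p : List Char) :
    cnt (insertChars w l) p = cnt l p + (if p ≠ [] ∧ p.isPrefixOf w then 1 else 0) := by
  induction w generalizing l p with
  | nil =>
    have : ¬ (p ≠ [] ∧ p.isPrefixOf ([] : List Char) = true) := by
      rintro ⟨hne, hpre⟩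
      cases p with
      | nil => exact hne rfl
      | cons a as => simp [List.isPrefixOf] at hpre
    rw [if_neg this]
    simp [insertChars]
  | cons c cs ih =>
    cases p with
    | nil => simp [cnt]
    | cons x xs =>
      by_cases hxc : x = c
      · subst hxc
        cases hf : l.find? x with
        | some t =>
          cases t with
          | node n ch =>
            have e1 : insertChars (x :: cs) l
                = l.set x (.node (n + 1) (insertChars cs ch)) := by
              simp [insertChars, hf]
            have e2 : (l.set x (.node (n + 1) (insertChars cs ch))).find? x
                = some (.node (n + 1) (insertChars cs ch)) := by
              rw [find?_set]; simp
            cases xs with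
            | nil =>
              rw [e1, cnt_cons, e2, cnt_cons, hf]
              simp [List.isPrefixOf]
            | cons y ys =>
              rw [e1, cnt_cons, e2, cnt_cons, hf]
              simp only [if_neg (by simp : ¬ (y :: ys) = ([] : List Char))]
              rw [ih]
              have : (x :: y :: ys).isPrefixOf (x :: cs) = (y :: ys).isPrefixOf cs := by
                simp [List.isPrefixOf]
              simp [this]
        | none =>
          have e1 : insertChars (x :: cs) l
              = l.set x (.node 1 (insertChars cs .nil)) := by
            simp [insertChars, hf]
          have e2 : (l.set x (.node 1 (insertChars cs .nil))).find? x
              = some (.node 1 (insertChars cs .nil)) := by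
            rw [find?_set]; simp
          cases xs with
          | nil =>
            rw [e1, cnt_cons, e2, cnt_cons, hf]
            simp [List.isPrefixOf]
          | cons y ys =>
            rw [e1, cnt_cons, e2, cnt_cons, hf]
            simp only [if_neg (by simp : ¬ (y :: ys) = ([] : List Char))]
            rw [ih]
            have h1 : (x :: y :: ys).isPrefixOf (x :: cs) = (y :: ys).isPrefixOf cs := by
              simp [List.isPrefixOf]
            have h2 : cnt PTrieL.nil (y :: ys) = 0 := by simp [cnt, PTrieL.find?]
            simp [h1, h2]
      · have hpre : ¬ (x :: xs).isPrefixOf (c :: cs) = true := by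
          simp [List.isPrefixOf, hxc]
        have e1 : cnt (insertChars (c :: cs) l) (x :: xs) = cnt l (x :: xs) := by
          cases hf : l.find? c with
          | some t =>
            cases t with
            | node n ch =>
              have : insertChars (c :: cs) l
                  = l.set c (.node (n + 1) (insertChars cs ch)) := by
                simp [insertChars, hf]
              rw [this, cnt_cons, find?_set, if_neg hxc, cnt_cons]
          | none =>
            have : insertChars (c :: cs) l
                = l.set c (.node 1 (insertChars cs .nil)) := by
              simp [insertChars, hf]
            rw [this, cnt_cons, find?_set, if_neg hxc, cnt_cons]
        rw [e1, if_neg (by simp [hpre])]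
        ring

theorem cnt_nil (p : List Char) : cnt PTrieL.nil p = 0 := by
  cases p <;> simp [cnt, PTrieL.find?]

theorem cnt_buildB (words : List String) (l : PTrieL) (p : List Char) (hp : p ≠ []) :
    cnt (words.foldl (fun l w => insertChars w.toList l) l) p = cnt l p + pcount words p := by
  induction words generalizing l with
  | nil => simp [pcount]
  | cons w ws ih =>
    simp only [List.foldl_cons]
    rw [ih, cnt_insertChars]
    unfold pcount
    rw [List.countP_cons]
    by_cases h : p.isPrefixOf w.toList <;> simp [h, hp] <;> push_cast <;> ring

-- descend along a path in the trie (proof device relating a subtrie to the root counts)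
def descend : PTrieL → List Char → Option PTrieL
  | l, [] => some l
  | l, c :: cs =>
    match l.find? c with
    | none => none
    | some (.node _ ch) => descend ch cs

theorem descend_append_singleton (root : PTrieL) (pre : List Char) (l : PTrieL)
    (h : descend root pre = some l) (c : Char) (n : Int) (ch : PTrieL)
    (hf : l.find? c = some (.node n ch)) :
    descend root (pre ++ [c]) = some ch := by
  induction pre generalizing root with
  | nil =>
    simp [descend] at h
    subst h
    simp [descend, hf]
  | cons a as ih =>
    simp only [descend] at h
    cases hfa : root.find? a with
    | none => rw [hfa] at h; simp at h
    | some t =>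
      cases t with
      | node m ch' =>
        rw [hfa] at h
        simp only [List.cons_append, descend, hfa]
        exact ih ch' h

theorem cnt_descend (pre : List Char) (root l : PTrieL) (h : descend root pre = some l)
    (x : Char) (xs : List Char) : cnt root (pre ++ x :: xs) = cnt l (x :: xs) := by
  induction pre generalizing root with
  | nil => simp [descend] at h; subst h; rfl
  | cons a as ih =>
    simp only [descend] at h
    cases hfa : root.find? a with
    | none => rw [hfa] at h; simp at h
    | some t =>
      cases t with
      | node m ch' =>
        rw [hfa] at h
        rw [List.cons_append, cnt_cons, hfa]
        simp only [if_neg (by simp : ¬ (as ++ x :: xs) = ([] : List Char))]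
        exact ih ch' h

theorem queryChars_typed (cs : List Char) (root : PTrieL) (pre : List Char) (l : PTrieL)
    (h : descend root pre = some l)
    (hpos : ∀ p : List Char, p ≠ [] → p.isPrefixOf (pre ++ cs) → 1 ≤ cnt root p) :
    queryChars cs l = typed (fun p => cnt root p) pre cs := by
  induction cs generalizing pre l with
  | nil => rfl
  | cons c cs ih =>
    have hc : cnt root (pre ++ [c]) = cnt l [c] := cnt_descend pre root l h c []
    have hpc : (pre ++ [c]).isPrefixOf (pre ++ c :: cs) := by
      rw [List.isPrefixOf_iff_prefix]
      exact ⟨cs, by simp⟩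
    have h1 : 1 ≤ cnt root (pre ++ [c]) := hpos _ (by simp) hpc
    cases hf : l.find? c with
    | none =>
      exfalso
      rw [hc] at h1
      simp [cnt, hf] at h1
    | some t =>
      cases t with
      | node n ch =>
        have hn : cnt root (pre ++ [c]) = n := by
          rw [hc]; simp [cnt, hf]
        simp only [queryChars, typed, hf, hn]
        by_cases h1n : n = 1
        · simp [h1n]
        · have hdes : descend root (pre ++ [c]) = some ch :=
            descend_append_singleton root pre l h c n ch hf
          have hpos' : ∀ p : List Char, p ≠ [] → p.isPrefixOf ((pre ++ [c]) ++ cs) →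
              1 ≤ cnt root p := by
            intro p hne hpre
            apply hpos p hne
            rwa [List.append_assoc] at hpre
          rw [ih (pre ++ [c]) ch hdes hpos']
          simp [h1n]

theorem typed_congr (f g : List Char → Int) (pre cs : List Char)
    (h : ∀ p : List Char, p ≠ [] → f p = g p) : typed f pre cs = typed g pre cs := by
  induction cs generalizing pre with
  | nil => rfl
  | cons c cs ih =>
    simp only [typed]
    rw [h (pre ++ [c]) (by simp), ih (pre ++ [c])]

theorem loopA_typed (d : PySem.Dict String Int) (w : String) :
    ∀ (n j : Nat), j + n = w.toList.length →
    loopA d w (PySem.List.pyRange (j : Int) ((w.toList.length : Int)) 1)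
      = typed (fun p => d.getD (String.ofList p) 0) (w.toList.take j) (w.toList.drop j) := by
  intro n
  induction n with
  | zero =>
    intro j hj
    have hj' : j = w.toList.length := by omega
    rw [PySem.List.pyRange_one_eq_nil (by omega)]
    rw [hj', List.drop_length]
    rfl
  | succ n ih =>
    intro j hj
    have hjlt : j < w.toList.length := by omega
    rw [PySem.List.pyRange_one_cons (by exact_mod_cast hjlt)]
    have hstep : ((j : Int) + 1) = (((j + 1 : Nat)) : Int) := by push_cast; ring
    have hdrop : w.toList.drop j = w.toList[j] :: w.toList.drop (j + 1) :=
      List.drop_eq_getElem_cons hjlt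
    have htake : w.toList.take j ++ [w.toList[j]] = w.toList.take (j + 1) := by
      rw [List.take_succ]
      simp [List.getElem?_eq_getElem hjlt]
    have hkey : PySem.Str.slice w none (some ((j : Int) + 1))
        = String.ofList (w.toList.take (j + 1)) := by
      rw [← String.toList_inj, key_toList]
      simp
    simp only [loopA, hdrop, typed, htake, hkey]
    rw [hstep, ih (j + 1) (by omega)]

-- the two fold-accumulations agree once the per-word contributions agree on members
theorem foldl_sum_congr (F G : String → Int) :
    ∀ (ws : List String), (∀ w ∈ ws, F w = G w) → ∀ a : Int,
    ws.foldl (fun acc w => acc + F w) a = ws.foldl (fun acc w => acc + G w) a := by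
  intro ws
  induction ws with
  | nil => intro _ _; rfl
  | cons w ws ih =>
    intro h a
    simp only [List.foldl_cons]
    rw [h w (by simp), ih (fun x hx => h x (by simp [hx]))]

-- per-word: A's inner loop computes typed (pcount words) on w
theorem perword_A (words : List String) (w : String) :
    loopA (words.foldl insertWordA PySem.Dict.empty) w
        (PySem.List.pyRange 0 (PySem.Str.len w) 1)
      = typed (fun p => pcount words p) [] w.toList := by
  have h0 : ((0 : Nat) : Int) = (0 : Int) := rfl
  rw [PySem.Str.len, ← h0, loopA_typed _ w w.toList.length 0 (by omega)]
  simp only [List.take_zero, List.drop_zero]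
  apply typed_congr
  intro p hp
  have hp' : (String.ofList p).toList ≠ [] := by simpa using hp
  rw [getD_buildA words PySem.Dict.empty (String.ofList p) hp']
  simp [pcount]

-- per-word: B's inner loop computes typed (pcount words) on w, for w a member of words
theorem perword_B (words : List String) (w : String) (hw : w ∈ words) :
    queryChars w.toList (words.foldl (fun l w => insertChars w.toList l) PTrieL.nil)
      = typed (fun p => pcount words p) [] w.toList := by
  set root := words.foldl (fun l w => insertChars w.toList l) PTrieL.nil with hroot
  have hcnt : ∀ p : List Char, p ≠ [] → cnt root p = pcount words p := by
    intro p hp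
    rw [hroot, cnt_buildB words PTrieL.nil p hp, cnt_nil]
    ring
  have hpos : ∀ p : List Char, p ≠ [] → p.isPrefixOf (([] : List Char) ++ w.toList) →
      1 ≤ cnt root p := by
    intro p hp hpre
    rw [hcnt p hp]
    unfold pcount
    have : 1 ≤ words.countP (fun w' => p.isPrefixOf w'.toList) := by
      rw [Nat.succ_le_iff, List.countP_pos_iff]
      exact ⟨w, hw, by simpa using hpre⟩
    exact_mod_cast this
  rw [queryChars_typed w.toList root [] root rfl hpos]
  apply typed_congr
  intro p hp
  exact hcnt p hp

-- ===== VERDICT (by name: the statement is the Claim_ definition above) =====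
theorem solution_spec : Claim_equal_solution := by
  intro words _
  unfold Spec_solution solution solution_alt
  simp only []
  apply Eq.trans (foldl_sum_congr _ (fun w => typed (fun p => pcount words p) [] w.toList)
    words (fun w _ => perword_A words w) 0)
  exact (foldl_sum_congr _ _ words (fun w hw => perword_B words w hw) 0).symm
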